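-- pv_equiv track=rewrite | github.com/arin17bishwa/myCP_sols | CF/1512D.py | f
-- ===== SOURCE A (Python) =====
-- def f(arr, idx, s):
--     ans = []
--     t = 1
--     for i in range(len(arr)):
--         if i == idx:
--             continue
--         if arr[i] == s:
--             if t:
--                 t = 0
--                 continue
--         ans.append(arr[i])
--     return ' '.join(map(str, ans))
-- ===== SOURCE B (Python) =====
-- def f(arr, idx, s):
--     if 0 <= idx < len(arr):
--         rest = arr[:idx] + arr[idx + 1:]
--     else:
--         rest = list(arr)
--     if s in rest:
--         rest.remove(s)
--     return ' '.join(map(str, rest))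
-- ===== Notes on version B (the rewrite author's own statement) =====
-- stated objective: simpler
-- what changed: Replaces the index loop with flag-tracked first-occurrence state by slicing out the idx element and then removing the first occurrence of s with a membership-guarded list.remove.
import Mathlib
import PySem

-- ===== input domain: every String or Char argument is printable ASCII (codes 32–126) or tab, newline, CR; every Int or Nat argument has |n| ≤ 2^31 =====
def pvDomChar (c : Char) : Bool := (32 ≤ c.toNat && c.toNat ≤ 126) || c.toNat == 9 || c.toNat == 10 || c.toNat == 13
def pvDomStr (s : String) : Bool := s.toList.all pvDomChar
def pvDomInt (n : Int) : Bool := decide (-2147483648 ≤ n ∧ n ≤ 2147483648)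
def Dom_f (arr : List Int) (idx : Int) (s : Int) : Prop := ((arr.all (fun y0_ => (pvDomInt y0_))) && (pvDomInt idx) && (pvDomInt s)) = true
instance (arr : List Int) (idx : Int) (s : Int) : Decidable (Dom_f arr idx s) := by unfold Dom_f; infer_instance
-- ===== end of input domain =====

-- B replaces A's index loop with removal-flag state by slice-out-the-index plus a guarded first-occurrence remove (objective: simpler).

-- ===== PORT A =====
-- literal transliteration of A: loop over range(len(arr)) with state (ans, t)
def f (arr : List Int) (idx : Int) (s : Int) : String :=
  PySem.Str.join " "
    ((((PySem.List.pyRange 0 (arr.length : Int) 1).foldl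
      (fun (p : List Int × Int) i =>
        if i = idx then p
        else if PySem.List.pyGetD arr i 0 = s ∧ p.2 ≠ 0 then (p.1, 0)
        else (p.1 ++ [PySem.List.pyGetD arr i 0], p.2)) ([], 1)).1).map PySem.Int.toStr)

-- ===== PORT B =====
-- literal transliteration of Source B: slice out idx when in range, then membership-guarded remove
def pvRest (arr : List Int) (idx : Int) : List Int :=
  if 0 ≤ idx ∧ idx < (arr.length : Int) then
    PySem.List.slice arr none (some idx) ++ PySem.List.slice arr (some (idx + 1)) none
  else arr

def pvRemoveIfPresent (rest : List Int) (s : Int) : List Int :=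
  if s ∈ rest then (PySem.List.remove? rest s).getD rest else rest

def f_alt (arr : List Int) (idx : Int) (s : Int) : String :=
  PySem.Str.join " " ((pvRemoveIfPresent (pvRest arr idx) s).map PySem.Int.toStr)

-- ===== PRECONDITION & SPEC =====
def Spec_f (arr : List Int) (idx : Int) (s : Int) (out : String) : Prop := out = f_alt arr idx s
instance (arr : List Int) (idx : Int) (s : Int) (out : String) : Decidable (Spec_f arr idx s out) := by unfold Spec_f; infer_instance

-- ===== CLAIM (what is proved, stated in full; the proofs are below) =====
def Claim_equal_f : Prop := ∀ (arr : List Int) (idx : Int) (s : Int), Dom_f arr idx s → Spec_f arr idx s (f arr idx s)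

-- ===== LEMMAS AND PROOFS =====

-- the elements of arr whose absolute index (starting at k) differs from idx
def pvKeep (l : List Int) (k : Nat) (idx : Int) : List Int :=
  match l with
  | [] => []
  | a :: l => if (k : Int) = idx then pvKeep l (k + 1) idx else a :: pvKeep l (k + 1) idx

lemma pvKeep_eq (idx : Int) : ∀ (l : List Int) (k : Nat),
    pvKeep l k idx =
      if (k : Int) ≤ idx ∧ idx < (k : Int) + l.length then
        l.take (idx - k).toNat ++ l.drop ((idx - k).toNat + 1)
      else l := by
  intro l
  induction l with
  | nil => intro k; simp [pvKeep]
  | cons a l ih =>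
    intro k
    simp only [pvKeep, List.length_cons]
    rw [ih (k + 1)]
    push_cast
    split_ifs with h h1 h2 h1 h2
    · exfalso; omega
    · exfalso; omega
    · have e : (idx - (k : Int)).toNat = 0 := by omega
      simp [e]
    · exfalso; omega
    · have e : (idx - (k : Int)).toNat = (idx - ((k : Int) + 1)).toNat + 1 := by omega
      simp [e]
    · exfalso; omega
    · exfalso; omega
    · rfl

-- A's loop after the flag has been consumed (t = 0): appends every non-idx element
lemma pvLoop0 (arr : List Int) (idx s : Int) : ∀ (d k : Nat), arr.length ≤ k + d → ∀ (ans : List Int),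
    (PySem.List.pyRange (k : Int) (arr.length : Int) 1).foldl
      (fun (p : List Int × Int) i =>
        if i = idx then p
        else if PySem.List.pyGetD arr i 0 = s ∧ p.2 ≠ 0 then (p.1, 0)
        else (p.1 ++ [PySem.List.pyGetD arr i 0], p.2)) (ans, 0)
      = (ans ++ pvKeep (arr.drop k) k idx, 0) := by
  intro d
  induction d with
  | zero =>
    intro k hk ans
    have h1 : (arr.length : Int) ≤ (k : Int) := by omega
    rw [PySem.List.pyRange_one_eq_nil h1]
    have : arr.drop k = [] := List.drop_eq_nil_of_le (by omega)
    simp [this, pvKeep]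
  | succ d ih =>
    intro k hk ans
    by_cases hlt : k < arr.length
    · rw [PySem.List.pyRange_one_cons (by exact_mod_cast hlt)]
      rw [List.drop_eq_getElem_cons hlt]
      have hget : PySem.List.pyGetD arr (k : Int) 0 = arr[k] := by
        simp [PySem.List.pyGetD_natCast, List.getD_eq_getElem?_getD, hlt]
      simp only [List.foldl_cons]
      by_cases hidx : (k : Int) = idx
      · simp only [pvKeep, if_pos hidx]
        have := ih (k + 1) (by omega) ans
        push_cast at this ⊢
        exact this
      · simp only [hget, pvKeep, if_neg hidx]
        by_cases hs : arr[k] = s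
        · simp only [hs, ne_eq, not_true_eq_false, and_false, if_false]
          have := ih (k + 1) (by omega) (ans ++ [s])
          push_cast at this ⊢
          rw [this]
          simp
        · simp only [hs, false_and, if_false]
          have := ih (k + 1) (by omega) (ans ++ [arr[k]])
          push_cast at this ⊢
          rw [this]
          simp
    · have h1 : (arr.length : Int) ≤ (k : Int) := by omega
      rw [PySem.List.pyRange_one_eq_nil h1]
      have : arr.drop k = [] := List.drop_eq_nil_of_le (by omega)
      simp [this, pvKeep]

-- A's loop with the flag still set (t = 1): appends non-idx elements, skipping the first s
lemma pvLoop1 (arr : List Int) (idx s : Int) : ∀ (d k : Nat), arr.length ≤ k + d → ∀ (ans : List Int),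
    (PySem.List.pyRange (k : Int) (arr.length : Int) 1).foldl
      (fun (p : List Int × Int) i =>
        if i = idx then p
        else if PySem.List.pyGetD arr i 0 = s ∧ p.2 ≠ 0 then (p.1, 0)
        else (p.1 ++ [PySem.List.pyGetD arr i 0], p.2)) (ans, 1)
      = (ans ++ (pvKeep (arr.drop k) k idx).erase s,
         if s ∈ pvKeep (arr.drop k) k idx then 0 else 1) := by
  intro d
  induction d with
  | zero =>
    intro k hk ans
    have h1 : (arr.length : Int) ≤ (k : Int) := by omega
    rw [PySem.List.pyRange_one_eq_nil h1]
    have : arr.drop k = [] := List.drop_eq_nil_of_le (by omega)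
    simp [this, pvKeep]
  | succ d ih =>
    intro k hk ans
    by_cases hlt : k < arr.length
    · rw [PySem.List.pyRange_one_cons (by exact_mod_cast hlt)]
      rw [List.drop_eq_getElem_cons hlt]
      have hget : PySem.List.pyGetD arr (k : Int) 0 = arr[k] := by
        simp [PySem.List.pyGetD_natCast, List.getD_eq_getElem?_getD, hlt]
      simp only [List.foldl_cons]
      by_cases hidx : (k : Int) = idx
      · simp only [pvKeep, if_pos hidx]
        have := ih (k + 1) (by omega) ans
        push_cast at this ⊢
        exact this
      · simp only [hget, pvKeep, if_neg hidx]
        by_cases hs : arr[k] = s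
        · simp only [hs, ne_eq, one_ne_zero, not_false_eq_true, and_self, if_true]
          have := pvLoop0 arr idx s d (k + 1) (by omega) ans
          push_cast at this ⊢
          rw [this]
          simp
        · simp only [hs, false_and, if_false]
          have := ih (k + 1) (by omega) (ans ++ [arr[k]])
          push_cast at this ⊢
          rw [this]
          have herase : (arr[k] :: pvKeep (arr.drop (k + 1)) (k + 1) idx).erase s
              = arr[k] :: (pvKeep (arr.drop (k + 1)) (k + 1) idx).erase s :=
            List.erase_cons_tail (by simpa using hs)
          have hmem : (s ∈ arr[k] :: pvKeep (arr.drop (k + 1)) (k + 1) idx)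
              ↔ s ∈ pvKeep (arr.drop (k + 1)) (k + 1) idx := by
            constructor
            · intro h; rcases List.mem_cons.mp h with h | h
              · exact absurd h.symm hs
              · exact h
            · exact fun h => List.mem_cons_of_mem _ h
          rw [herase]
          simp only [hmem, List.append_assoc, List.singleton_append]
    · have h1 : (arr.length : Int) ≤ (k : Int) := by omega
      rw [PySem.List.pyRange_one_eq_nil h1]
      have : arr.drop k = [] := List.drop_eq_nil_of_le (by omega)
      simp [this, pvKeep]

-- B's rest equals pvKeep arr 0 idx
lemma pvRest_eq (arr : List Int) (idx : Int) : pvRest arr idx = pvKeep arr 0 idx := by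
  unfold pvRest
  rw [pvKeep_eq idx arr 0]
  by_cases h : 0 ≤ idx ∧ idx < (arr.length : Int)
  · rw [if_pos h, if_pos (by push_cast; omega)]
    rw [PySem.List.slice_to arr h.1, PySem.List.slice_from arr (by omega)]
    congr 2
    · omega
    · omega
  · rw [if_neg h, if_neg (by push_cast; omega)]

theorem pv_main (arr : List Int) (idx s : Int) : f arr idx s = f_alt arr idx s := by
  unfold f f_alt pvRemoveIfPresent
  rw [pvRest_eq arr idx]
  have hloop := pvLoop1 arr idx s arr.length 0 (by omega) []
  simp only [Nat.cast_zero, List.drop_zero, List.nil_append] at hloop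
  rw [hloop]
  by_cases hmem : s ∈ pvKeep arr 0 idx
  · rw [PySem.List.remove?_eq_some_erase _ s hmem]
    simp [hmem]
  · simp [hmem, List.erase_of_not_mem hmem]

-- ===== VERDICT (by name: the statement is the Claim_ definition above) =====
theorem f_spec : Claim_equal_f := by
  intro arr idx s _
  unfold Spec_f
  exact pv_main arr idx s
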